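-- pv_equiv track=rewrite | github.com/tmartin6/leoblue | ble_utils.py | hex_cell_to_binary_matrix
-- ===== SOURCE A (Python) =====
-- def hex_cell_to_binary_matrix(hex_list):
--     """
--     Convertit une liste de chaînes hexadécimales en une "matrice" (liste de listes) binaire.
--     Chaque élément de 'hex_list' est une chaîne hex (ex: '1A'),
--     et on crée une ligne de bits (0/1) pour chaque hex string.
--     """
--     binary_matrix = []
--
--     for hex_seq in hex_list:
--         binary_row = []
--         for char in hex_seq:
--             # Convertir un caractère hex (ex: 'F') en entier 0..15
--             val = int(char, 16)
--             # Convertir en binaire 4 bits (ex: '1111')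
--             bin_str = format(val, '04b')
--             # Convertir la chaîne en liste d'entiers (0/1)
--             for b in bin_str:
--                 binary_row.append(int(b))
--
--         # Ajouter la ligne à la matrice
--         binary_matrix.append(binary_row)
--
--     return binary_matrix
-- ===== SOURCE B (Python) =====
-- def hex_cell_to_binary_matrix(hex_list):
--     binary_matrix = []
--     for hex_seq in hex_list:
--         if not hex_seq:
--             binary_matrix.append([])
--             continue
--         val = int(hex_seq, 16)
--         bits = format(val, '0{}b'.format(4 * len(hex_seq)))
--         binary_matrix.append([int(b) for b in bits])
--     return binary_matrix
-- ===== Notes on version B (the rewrite author's own statement) =====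
-- stated objective: alternative
-- what changed: B replaces A's per-character inner loop (int(char,16) + format(val,'04b') + per-bit append) by one whole-string int(hex_seq,16) conversion and a single width-padded binary format per row, with an explicit empty-string row.
import Mathlib
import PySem

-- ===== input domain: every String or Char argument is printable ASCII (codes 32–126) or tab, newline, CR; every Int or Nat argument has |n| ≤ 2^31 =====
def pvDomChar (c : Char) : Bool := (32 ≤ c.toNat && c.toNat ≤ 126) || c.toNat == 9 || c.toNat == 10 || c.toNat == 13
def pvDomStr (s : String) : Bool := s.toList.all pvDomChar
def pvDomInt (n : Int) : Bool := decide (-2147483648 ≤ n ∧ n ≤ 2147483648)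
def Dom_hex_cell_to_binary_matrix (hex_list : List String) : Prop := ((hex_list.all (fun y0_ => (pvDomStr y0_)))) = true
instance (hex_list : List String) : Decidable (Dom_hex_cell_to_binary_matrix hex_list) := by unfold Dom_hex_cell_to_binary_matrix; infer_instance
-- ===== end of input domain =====

-- B converts each whole hex string with one fold into an integer and formats it once as a
-- zero-padded 4·n-bit row, instead of A's per-character convert-format-append inner loops
-- (alternative decomposition; return values proved equal on all hex-digit inputs).


-- ===== PORT A =====
-- int(c, 16) for a single hex-digit character (exact on Pre_, where every char is a hex digit)
def hexVal (c : Char) : Int :=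
  if 48 ≤ c.toNat ∧ c.toNat ≤ 57 then (c.toNat : Int) - 48
  else if 97 ≤ c.toNat ∧ c.toNat ≤ 102 then (c.toNat : Int) - 87
  else if 65 ≤ c.toNat ∧ c.toNat ≤ 70 then (c.toNat : Int) - 55
  else 0

-- [int(b) for b in format(v, '0{k}b')] : the k low bits of v, most significant first
-- (exact for 0 ≤ v < 2^k, which holds at every call site inside Pre_)
def toBits : Nat → Int → List Int
  | 0, _ => []
  | k + 1, v => toBits k (PySem.Int.floordiv v 2) ++ [PySem.Int.mod v 2]

def hex_cell_to_binary_matrix (hex_list : List String) : List (List Int) :=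
  hex_list.foldl (fun binary_matrix hex_seq =>
    binary_matrix ++
      [hex_seq.toList.foldl (fun binary_row c => binary_row ++ toBits 4 (hexVal c)) []]) []

-- ===== PORT B =====
def hex_cell_to_binary_matrix_alt (hex_list : List String) : List (List Int) :=
  hex_list.foldl (fun binary_matrix hex_seq =>
    if hex_seq.toList = [] then binary_matrix ++ [[]]
    else
      -- int(hex_seq, 16): one fold over the whole string (exact on Pre_)
      let val := hex_seq.toList.foldl (fun a c => 16 * a + hexVal c) 0
      binary_matrix ++ [toBits (4 * hex_seq.toList.length) val]) []

-- ===== PRECONDITION & SPEC =====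
-- Pre_ : every character of every string is a hex digit — exactly the inputs where
-- Python A returns normally (int(char, 16) raises ValueError on any other character).
def pvIsHexDigit (c : Char) : Bool :=
  (48 ≤ c.toNat && c.toNat ≤ 57) || (97 ≤ c.toNat && c.toNat ≤ 102) || (65 ≤ c.toNat && c.toNat ≤ 70)
def Pre_hex_cell_to_binary_matrix (hex_list : List String) : Prop :=
  (hex_list.all (fun s => s.toList.all pvIsHexDigit)) = true
instance (hex_list : List String) : Decidable (Pre_hex_cell_to_binary_matrix hex_list) := by
  unfold Pre_hex_cell_to_binary_matrix; infer_instance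

def pvWitness_hex_cell_to_binary_matrix : List String := ["1A", "", "ff"]

def Spec_hex_cell_to_binary_matrix (hex_list : List String) (out : List (List Int)) : Prop := out = hex_cell_to_binary_matrix_alt hex_list
instance (hex_list : List String) (out : List (List Int)) : Decidable (Spec_hex_cell_to_binary_matrix hex_list out) := by unfold Spec_hex_cell_to_binary_matrix; infer_instance

-- ===== CLAIM (what is proved, stated in full; the proofs are below) =====
def Claim_equal_hex_cell_to_binary_matrix : Prop := ∀ (hex_list : List String), Dom_hex_cell_to_binary_matrix hex_list → Pre_hex_cell_to_binary_matrix hex_list → Spec_hex_cell_to_binary_matrix hex_list (hex_cell_to_binary_matrix hex_list)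

-- ===== LEMMAS AND PROOFS =====

theorem hexVal_bounds (c : Char) : 0 ≤ hexVal c ∧ hexVal c < 16 := by
  unfold hexVal; split_ifs <;> omega

-- peeling four bits off the bottom of 16*a + v
theorem toBits_step (k : Nat) (a v : Int) (hv0 : 0 ≤ v) (hv : v < 16) :
    toBits (k + 4) (16 * a + v) = toBits k a ++ toBits 4 v := by
  show toBits (k + 1 + 1 + 1 + 1) (16 * a + v) = _
  simp only [toBits,
    PySem.Int.floordiv_eq_ediv_of_pos (a := 16 * a + v) (by norm_num : (0:Int) < 2),
    PySem.Int.mod_eq_emod_of_pos (a := 16 * a + v) (by norm_num : (0:Int) < 2)]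
  have h1 : (16 * a + v) / 2 = 8 * a + v / 2 := by omega
  have h2 : (16 * a + v) % 2 = v % 2 := by omega
  rw [h1, h2]
  simp only [PySem.Int.floordiv_eq_ediv_of_pos (a := 8 * a + v / 2) (by norm_num : (0:Int) < 2),
    PySem.Int.mod_eq_emod_of_pos (a := 8 * a + v / 2) (by norm_num : (0:Int) < 2)]
  have h3 : (8 * a + v / 2) / 2 = 4 * a + v / 2 / 2 := by omega
  have h4 : (8 * a + v / 2) % 2 = v / 2 % 2 := by omega
  rw [h3, h4]
  simp only [PySem.Int.floordiv_eq_ediv_of_pos (a := 4 * a + v / 2 / 2) (by norm_num : (0:Int) < 2),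
    PySem.Int.mod_eq_emod_of_pos (a := 4 * a + v / 2 / 2) (by norm_num : (0:Int) < 2)]
  have h5 : (4 * a + v / 2 / 2) / 2 = 2 * a + v / 2 / 2 / 2 := by omega
  have h6 : (4 * a + v / 2 / 2) % 2 = v / 2 / 2 % 2 := by omega
  rw [h5, h6]
  simp only [PySem.Int.floordiv_eq_ediv_of_pos (a := 2 * a + v / 2 / 2 / 2) (by norm_num : (0:Int) < 2),
    PySem.Int.mod_eq_emod_of_pos (a := 2 * a + v / 2 / 2 / 2) (by norm_num : (0:Int) < 2)]
  have h7 : (2 * a + v / 2 / 2 / 2) / 2 = a := by omega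
  have h8 : (2 * a + v / 2 / 2 / 2) % 2 = v / 2 / 2 / 2 % 2 := by omega
  rw [h7, h8]
  -- the RHS's toBits 4 v is already unfolded; align its floordiv/mod chain
  simp only [PySem.Int.floordiv_eq_ediv_of_pos (b := (2:Int)) (by norm_num : (0:Int) < 2),
    PySem.Int.mod_eq_emod_of_pos (b := (2:Int)) (by norm_num : (0:Int) < 2)]
  simp [List.append_assoc]

-- the whole-string value's 4·n-bit expansion is the concatenation of per-char 4-bit blocks
theorem fold_bits (cs : List Char) : ∀ (k : Nat) (a : Int), 0 ≤ a →
    toBits (k + 4 * cs.length) (cs.foldl (fun acc c => 16 * acc + hexVal c) a)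
      = toBits k a ++ cs.flatMap (fun c => toBits 4 (hexVal c)) := by
  induction cs with
  | nil => simp
  | cons c cs ih =>
    intro k a ha
    have hb := hexVal_bounds c
    have h : k + 4 * (c :: cs).length = (k + 4) + 4 * cs.length := by
      simp [List.length_cons]; ring
    rw [h]
    simp only [List.foldl_cons, List.flatMap_cons]
    rw [ih (k + 4) (16 * a + hexVal c) (by omega),
      toBits_step k a (hexVal c) hb.1 hb.2, List.append_assoc]

-- both outer loops are 'append one row per string'
theorem foldl_rows (g : String → List Int) (l : List String) (init : List (List Int)) :
    l.foldl (fun m s => m ++ [g s]) init = init ++ l.map g := by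
  induction l generalizing init with
  | nil => simp
  | cons s l ih => simp [ih]

theorem rowA_eq_rowB (s : String) :
    s.toList.foldl (fun binary_row c => binary_row ++ toBits 4 (hexVal c)) []
      = if s.toList = [] then ([] : List Int)
        else toBits (4 * s.toList.length) (s.toList.foldl (fun a c => 16 * a + hexVal c) 0) := by
  rw [PySem.List.foldl_append_eq_flatMap]
  split
  · simp [*]
  · have := fold_bits s.toList 0 0 le_rfl
    simpa [toBits] using this.symm

-- B's outer loop appends one row per string
theorem foldB (l : List String) (init : List (List Int)) :
    l.foldl (fun binary_matrix hex_seq =>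
      if hex_seq.toList = [] then binary_matrix ++ [[]]
      else
        let val := hex_seq.toList.foldl (fun a c => 16 * a + hexVal c) 0
        binary_matrix ++ [toBits (4 * hex_seq.toList.length) val]) init
    = init ++ l.map (fun s =>
        if s.toList = [] then ([] : List Int)
        else toBits (4 * s.toList.length) (s.toList.foldl (fun a c => 16 * a + hexVal c) 0)) := by
  induction l generalizing init with
  | nil => simp
  | cons s l ih =>
    simp only [List.foldl_cons, List.map_cons]
    rw [ih]
    split <;> simp

-- ===== VERDICT (by name: the statement is the Claim_ definition above) =====
theorem hex_cell_to_binary_matrix_spec : Claim_equal_hex_cell_to_binary_matrix := by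
  intro hex_list _ _
  unfold Spec_hex_cell_to_binary_matrix hex_cell_to_binary_matrix hex_cell_to_binary_matrix_alt
  rw [foldB, foldl_rows]
  simp only [List.nil_append]
  exact (List.map_congr_left fun s _ => (rowA_eq_rowB s).symm).symm
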